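-- pv_equiv track=rewrite | github.com/FruVirus/coding_practice | src/clrs/arrays/sorted_inner_product.py | sorted_inner_product
-- ===== SOURCE A (Python) =====
-- def sorted_inner_product(l1, l2):
--     i = j = sum = 0
--     while i < len(l1) and j < len(l2):
--         if l1[i][0] == l2[j][0]:
--             sum += l1[i][1] * l2[j][1]
--             i += 1
--             j += 1
--         elif l1[i][0] < l2[j][0]:
--             i += 1
--         else:
--             j += 1
--     return sum
-- ===== SOURCE B (Python) =====
-- def sorted_inner_product(l1, l2):
--     d = {idx: val for idx, val in l1}
--     total = 0
--     for idx, val in l2: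
--         if idx in d:
--             total += d[idx] * val
--     return total
-- ===== Notes on version B (the rewrite author's own statement) =====
-- stated objective: idiomatic
-- what changed: Replaces the sorted two-pointer merge with a one-pass dict index over l1 followed by a single scan of l2 summing d[idx]*val, dropping any reliance on sorted order.
-- outside the precondition, e.g. on sorted_inner_product([(1, 2), (1, 3)], [(1, 4)]): A returns 8, B returns 12; on sorted_inner_product([(3, 1), (1, 2)], [(1, 5), (3, 7)]): A returns 7, B returns 17
import Mathlib
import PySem

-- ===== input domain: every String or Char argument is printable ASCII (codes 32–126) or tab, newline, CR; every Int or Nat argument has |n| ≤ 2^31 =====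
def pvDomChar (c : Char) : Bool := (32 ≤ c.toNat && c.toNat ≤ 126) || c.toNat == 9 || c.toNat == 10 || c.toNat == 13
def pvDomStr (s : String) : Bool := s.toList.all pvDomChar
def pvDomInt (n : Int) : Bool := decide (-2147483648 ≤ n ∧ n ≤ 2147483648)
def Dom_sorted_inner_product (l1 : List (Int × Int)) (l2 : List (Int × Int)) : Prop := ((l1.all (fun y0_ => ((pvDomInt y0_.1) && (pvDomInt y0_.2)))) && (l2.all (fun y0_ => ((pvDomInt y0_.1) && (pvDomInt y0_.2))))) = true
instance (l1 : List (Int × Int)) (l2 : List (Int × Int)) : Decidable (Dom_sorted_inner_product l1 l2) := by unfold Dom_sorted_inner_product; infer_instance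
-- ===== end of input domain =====

-- B replaces A's sorted two-pointer merge by a dict index over l1 plus a single scan of l2 (more idiomatic, same cost).


-- ===== PORT A =====
-- the while loop of A, on indices i, j and the running sum; fuel = an upper bound on the
-- remaining iterations (each step consumes an element of l1 or l2), so with fuel
-- l1.length + l2.length the loop runs exactly as Python's does
def pvALoop (l1 l2 : List (Int × Int)) (fuel : Nat) (i j : Nat) (s : Int) : Int :=
  match fuel with
  | 0 => s
  | fuel + 1 =>
    if h : i < l1.length ∧ j < l2.length then
      if l1[i].1 = l2[j].1 then pvALoop l1 l2 fuel (i + 1) (j + 1) (s + l1[i].2 * l2[j].2)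
      else if l1[i].1 < l2[j].1 then pvALoop l1 l2 fuel (i + 1) j s
      else pvALoop l1 l2 fuel i (j + 1) s
    else s

def sorted_inner_product (l1 : List (Int × Int)) (l2 : List (Int × Int)) : Int :=
  pvALoop l1 l2 (l1.length + l2.length) 0 0 0

-- ===== PORT B =====
def sorted_inner_product_alt (l1 : List (Int × Int)) (l2 : List (Int × Int)) : Int :=
  -- d = {idx: val for idx, val in l1}
  let d : PySem.Dict Int Int := l1.foldl (fun d p => d.insert p.1 p.2) PySem.Dict.empty
  -- for idx, val in l2: if idx in d: total += d[idx] * val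
  l2.foldl (fun total p =>
    match d.get? p.1 with
    | some w => total + w * p.2
    | none => total) 0

-- ===== PRECONDITION & SPEC =====
-- Pre_ excludes inputs that break the function's sorted-distinct-index contract (an index list not
-- strictly increasing) unless their key sets are disjoint: on those contract-breaking inputs A's
-- positional merge pairing and B's last-value dict collapse are both accidental, equally defensible
-- readings; key-disjoint inputs stay inside Pre_ (there both programs return 0 whatever the order).
def Pre_sorted_inner_product (l1 : List (Int × Int)) (l2 : List (Int × Int)) : Prop :=
  (l1.Pairwise (fun a b => a.1 < b.1) ∧ l2.Pairwise (fun a b => a.1 < b.1)) ∨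
  (∀ q ∈ l2, q.1 ∉ l1.map Prod.fst)
instance (l1 : List (Int × Int)) (l2 : List (Int × Int)) : Decidable (Pre_sorted_inner_product l1 l2) := by unfold Pre_sorted_inner_product; infer_instance

def pvWitness_sorted_inner_product : (List (Int × Int)) × (List (Int × Int)) :=
  ([(1, 2), (3, 4)], [(1, 5), (2, 6)])

def Spec_sorted_inner_product (l1 : List (Int × Int)) (l2 : List (Int × Int)) (out : Int) : Prop := out = sorted_inner_product_alt l1 l2
instance (l1 : List (Int × Int)) (l2 : List (Int × Int)) (out : Int) : Decidable (Spec_sorted_inner_product l1 l2 out) := by unfold Spec_sorted_inner_product; infer_instance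

-- ===== CLAIM (what is proved, stated in full; the proofs are below) =====
def Claim_equal_sorted_inner_product : Prop := ∀ (l1 : List (Int × Int)) (l2 : List (Int × Int)), Dom_sorted_inner_product l1 l2 → Pre_sorted_inner_product l1 l2 → Spec_sorted_inner_product l1 l2 (sorted_inner_product l1 l2)

-- ===== LEMMAS AND PROOFS =====

-- structural form of A's merge loop (proof-only helper)
def pvMerge : List (Int × Int) → List (Int × Int) → Int
  | [], _ => 0
  | _ :: _, [] => 0
  | a :: l1, b :: l2 =>
    if a.1 = b.1 then a.2 * b.2 + pvMerge l1 l2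
    else if a.1 < b.1 then pvMerge l1 (b :: l2)
    else pvMerge (a :: l1) l2

-- value looked up for key k in the association list l1 (0 if absent), proof-only
def pvLv (l1 : List (Int × Int)) (k : Int) : Int :=
  match l1.find? (fun p => p.1 = k) with
  | some p => p.2
  | none => 0

theorem pvMerge_nil_right : ∀ l : List (Int × Int), pvMerge l [] = 0 := by
  intro l; cases l <;> simp [pvMerge]

theorem pvMerge_cons_eq {a b : Int × Int} {l1 l2 : List (Int × Int)} (he : a.1 = b.1) :
    pvMerge (a :: l1) (b :: l2) = a.2 * b.2 + pvMerge l1 l2 := by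
  rw [pvMerge, if_pos he]

theorem pvMerge_cons_lt {a b : Int × Int} {l1 l2 : List (Int × Int)}
    (he : ¬a.1 = b.1) (hlt : a.1 < b.1) :
    pvMerge (a :: l1) (b :: l2) = pvMerge l1 (b :: l2) := by
  rw [pvMerge, if_neg he, if_pos hlt]

theorem pvMerge_cons_gt {a b : Int × Int} {l1 l2 : List (Int × Int)}
    (he : ¬a.1 = b.1) (hlt : ¬a.1 < b.1) :
    pvMerge (a :: l1) (b :: l2) = pvMerge (a :: l1) l2 := by
  rw [pvMerge, if_neg he, if_neg hlt]

theorem pvALoop_eq_merge (l1 l2 : List (Int × Int)) :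
    ∀ (fuel i j : Nat) (s : Int), l1.length - i + (l2.length - j) ≤ fuel →
    pvALoop l1 l2 fuel i j s = s + pvMerge (l1.drop i) (l2.drop j) := by
  intro fuel
  induction fuel with
  | zero =>
    intro i j s hle
    have h1 : l1.length ≤ i := by omega
    have h2 : l2.length ≤ j := by omega
    rw [pvALoop, List.drop_of_length_le h1, List.drop_of_length_le h2]
    simp [pvMerge]
  | succ fuel ih =>
    intro i j s hle
    rw [pvALoop]
    by_cases h : i < l1.length ∧ j < l2.length
    · obtain ⟨h1, h2⟩ := h
      rw [List.drop_eq_getElem_cons h1, List.drop_eq_getElem_cons h2,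
        dif_pos (⟨h1, h2⟩ : i < l1.length ∧ j < l2.length)]
      by_cases he : l1[i].1 = l2[j].1
      · rw [if_pos he, ih (i + 1) (j + 1) _ (by omega), pvMerge_cons_eq he]
        ring
      · rw [if_neg he]
        by_cases hlt : l1[i].1 < l2[j].1
        · rw [if_pos hlt, ih (i + 1) j _ (by omega),
            pvMerge_cons_lt he hlt, List.drop_eq_getElem_cons h2]
        · rw [if_neg hlt, ih i (j + 1) _ (by omega),
            pvMerge_cons_gt he hlt, List.drop_eq_getElem_cons h1]
    · rw [dif_neg h]
      rcases Nat.lt_or_ge i l1.length with h1 | h1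
      · have h2 : l2.length ≤ j := by omega
        rw [List.drop_of_length_le h2, pvMerge_nil_right]
        simp
      · rw [List.drop_of_length_le h1]
        simp [pvMerge]

theorem pvLv_not_found {l1 : List (Int × Int)} {k : Int}
    (h : ∀ p ∈ l1, k < p.1) : pvLv l1 k = 0 := by
  unfold pvLv
  rw [List.find?_eq_none.mpr]
  intro p hp
  simp only [decide_eq_true_eq]
  exact fun he => absurd (he ▸ h p hp) (lt_irrefl k)

theorem pvLv_cons_ne {a : Int × Int} {l1 : List (Int × Int)} {k : Int}
    (h : a.1 ≠ k) : pvLv (a :: l1) k = pvLv l1 k := by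
  unfold pvLv
  rw [List.find?_cons_of_neg (by simpa using h)]

theorem pvMerge_eq_sum : ∀ (l1 l2 : List (Int × Int)),
    l1.Pairwise (fun a b => a.1 < b.1) → l2.Pairwise (fun a b => a.1 < b.1) →
    pvMerge l1 l2 = (l2.map (fun q => pvLv l1 q.1 * q.2)).sum := by
  intro l1 l2
  induction hwf : l1.length + l2.length using Nat.strong_induction_on
    generalizing l1 l2 with
  | _ n ih =>
    intro hs1 hs2
    match l1, l2 with
    | [], l2 =>
      simp [pvMerge, pvLv]
    | a :: l1', [] =>
      simp [pvMerge]
    | a :: l1', b :: l2' =>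
      rw [List.pairwise_cons] at hs1 hs2
      by_cases he : a.1 = b.1
      · have hd : pvMerge (a :: l1') (b :: l2') = a.2 * b.2 + pvMerge l1' l2' := by
          rw [pvMerge, if_pos he]
        rw [hd, ih (l1'.length + l2'.length) (by simp [← hwf]; omega) _ _ rfl hs1.2 hs2.2]
        have hb : pvLv (a :: l1') b.1 = a.2 := by
          unfold pvLv
          rw [List.find?_cons_of_pos (by simpa using he)]
        have hrest : ∀ q ∈ l2', pvLv (a :: l1') q.1 = pvLv l1' q.1 := by
          intro q hq
          exact pvLv_cons_ne (he ▸ ne_of_lt (hs2.1 q hq))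
        simp only [List.map_cons, List.sum_cons, hb]
        congr 1
        exact congrArg List.sum (List.map_congr_left fun q hq => by rw [hrest q hq]).symm
      · by_cases hlt : a.1 < b.1
        · have hd : pvMerge (a :: l1') (b :: l2') = pvMerge l1' (b :: l2') := by
            rw [pvMerge, if_neg he, if_pos hlt]
          rw [hd, ih (l1'.length + (b :: l2').length) (by simp [← hwf]) _ _ rfl hs1.2
            (List.pairwise_cons.mpr hs2)]
          refine congrArg List.sum (List.map_congr_left ?_).symm
          intro q hq
          have hne : a.1 ≠ q.1 := by
            rcases List.mem_cons.mp hq with hq | hq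
            · rw [hq]; exact ne_of_lt hlt
            · exact ne_of_lt (lt_trans hlt (hs2.1 q hq))
          rw [pvLv_cons_ne hne]
        · have hgt : b.1 < a.1 := by
            rcases lt_trichotomy a.1 b.1 with h | h | h
            · exact absurd h hlt
            · exact absurd h he
            · exact h
          have hd : pvMerge (a :: l1') (b :: l2') = pvMerge (a :: l1') l2' := by
            rw [pvMerge, if_neg he, if_neg hlt]
          rw [hd, ih ((a :: l1').length + l2'.length) (by simp [← hwf]) _ _ rfl
            (List.pairwise_cons.mpr hs1) hs2.2]
          have hb : pvLv (a :: l1') b.1 = 0 := by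
            apply pvLv_not_found
            intro p hp
            rcases List.mem_cons.mp hp with hp | hp
            · exact hp ▸ hgt
            · exact lt_trans hgt (hs1.1 p hp)
          simp [hb]

-- the dict built by B has exactly l1 as its items when l1's keys are distinct
theorem pvDict_items {l1 : List (Int × Int)}
    (h : (l1.map Prod.fst).Nodup) :
    (l1.foldl (fun d p => d.insert p.1 p.2) (PySem.Dict.empty : PySem.Dict Int Int)).items = l1 := by
  have := PySem.Dict.items_foldl_insert_fresh (d := (PySem.Dict.empty : PySem.Dict Int Int))
    (l := l1) (k := Prod.fst) (v := Prod.snd)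
    (by intro a _; exact PySem.Dict.contains_empty _) h
  simpa using this

theorem pvDict_get? {l1 : List (Int × Int)} (k : Int)
    (h : (l1.map Prod.fst).Nodup) :
    (match (l1.foldl (fun d p => d.insert p.1 p.2) (PySem.Dict.empty : PySem.Dict Int Int)).get? k with
      | some w => w
      | none => (0 : Int)) = pvLv l1 k := by
  set d := l1.foldl (fun d p => d.insert p.1 p.2) (PySem.Dict.empty : PySem.Dict Int Int) with hd
  have hitems : d.items = l1 := pvDict_items h
  have hkeys : d.keys.Nodup := by
    simpa [PySem.Dict.keys, hitems] using h
  unfold pvLv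
  rcases hfind : l1.find? (fun p => p.1 = k) with _ | p
  · have hfind0 := hfind
    rw [List.find?_eq_none] at hfind0
    have : d.get? k = none := by
      rw [PySem.Dict.get?_eq_none_iff_not_mem_keys]
      simp only [PySem.Dict.keys, hitems]
      intro hk
      rcases List.mem_map.mp hk with ⟨p, hp, hpk⟩
      exact absurd (by simpa using hpk) (by simpa using hfind0 p hp)
    simp [this, hfind]
  · have hp := List.find?_some hfind
    have hmem := List.mem_of_find?_eq_some hfind
    have hpk : p.1 = k := by simpa using hp
    have hm : (k, p.2) ∈ d.items := by
      rw [hitems, ← hpk]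
      exact hmem
    have : d.get? k = some p.2 := PySem.Dict.get?_of_mem_items d hm hkeys
    simp [this, hfind]

-- B's scan of l2 as an explicit sum
theorem pvBFold_eq_sum (d : PySem.Dict Int Int) :
    ∀ (l2 : List (Int × Int)) (s : Int),
    l2.foldl (fun total p =>
      match d.get? p.1 with
      | some w => total + w * p.2
      | none => total) s
    = s + (l2.map (fun q => (match d.get? q.1 with | some w => w | none => 0) * q.2)).sum := by
  intro l2
  induction l2 with
  | nil => simp
  | cons q l2 ih =>
    intro s
    simp only [List.foldl_cons, List.map_cons, List.sum_cons, ih]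
    rcases h : d.get? q.1 with _ | w
    · simp
    · ring

theorem pvNodupKeys {l1 : List (Int × Int)}
    (h : l1.Pairwise (fun a b => a.1 < b.1)) : (l1.map Prod.fst).Nodup := by
  rw [List.nodup_iff_pairwise_ne, List.pairwise_map]
  exact h.imp ne_of_lt

theorem pvMerge_disjoint : ∀ (l1 l2 : List (Int × Int)),
    (∀ q ∈ l2, q.1 ∉ l1.map Prod.fst) → pvMerge l1 l2 = 0 := by
  intro l1 l2
  induction hwf : l1.length + l2.length using Nat.strong_induction_on
    generalizing l1 l2 with
  | _ n ih =>
    intro h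
    match l1, l2 with
    | [], l2 => simp [pvMerge]
    | a :: l1', [] => simp [pvMerge]
    | a :: l1', b :: l2' =>
      by_cases he : a.1 = b.1
      · exact absurd (List.mem_map.mpr ⟨a, List.mem_cons_self, he⟩)
          (h b List.mem_cons_self)
      · by_cases hlt : a.1 < b.1
        · rw [pvMerge_cons_lt he hlt]
          refine ih (l1'.length + (b :: l2').length) (by simp [← hwf]) _ _ rfl ?_
          intro q hq hmem
          exact h q hq (by simp only [List.map_cons]; exact List.mem_cons_of_mem a.1 hmem)
        · rw [pvMerge_cons_gt he hlt]
          refine ih ((a :: l1').length + l2'.length) (by simp [← hwf]) _ _ rfl ?_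
          intro q hq
          exact h q (List.mem_cons_of_mem b hq)

theorem pvAlt_disjoint (l1 l2 : List (Int × Int))
    (h : ∀ q ∈ l2, q.1 ∉ l1.map Prod.fst) : sorted_inner_product_alt l1 l2 = 0 := by
  unfold sorted_inner_product_alt
  rw [pvBFold_eq_sum, zero_add]
  apply List.sum_eq_zero
  intro x hx
  rcases List.mem_map.mp hx with ⟨q, hq, rfl⟩
  have hnone : (l1.foldl (fun d p => d.insert p.1 p.2)
      (PySem.Dict.empty : PySem.Dict Int Int)).get? q.1 = none := by
    rw [PySem.Dict.get?_eq_none_iff_not_mem_keys,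
      PySem.Dict.keys_foldl_insert_key (key := Prod.fst)]
    intro hk
    rcases (PySem.Set.mem_update _ _ _).mp hk with hk | hk
    · simp [PySem.Dict.keys_empty] at hk
    · exact h q hq hk
  rw [hnone]
  simp

-- ===== VERDICT (by name: the statement is the Claim_ definition above) =====
theorem sorted_inner_product_spec : Claim_equal_sorted_inner_product := by
  intro l1 l2 _ hpre
  unfold Spec_sorted_inner_product
  rcases hpre with ⟨h1, h2⟩ | hdisj
  · unfold sorted_inner_product sorted_inner_product_alt
    rw [pvALoop_eq_merge l1 l2 _ 0 0 0 (by omega), List.drop_zero, List.drop_zero, zero_add,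
      pvMerge_eq_sum l1 l2 h1 h2, pvBFold_eq_sum, zero_add]
    refine congrArg List.sum (List.map_congr_left ?_)
    intro q _
    rw [pvDict_get? q.1 (pvNodupKeys h1)]
  · rw [pvAlt_disjoint l1 l2 hdisj]
    unfold sorted_inner_product
    rw [pvALoop_eq_merge l1 l2 _ 0 0 0 (by omega), List.drop_zero, List.drop_zero, zero_add,
      pvMerge_disjoint l1 l2 hdisj]
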